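-- pv_equiv track=rewrite | github.com/yswang168/witness | cb_witness.py | is_compact
-- ===== SOURCE A (Python) =====
-- def is_compact(res): # res is a minimal beta-witness, which is a list of pairs (atom, witness)
--     for i in range(len(res)):
--        if len(res[i][1]) == 1: continue
--
--        for j in range(len(res)):
--            if j==i: continue
--
--        #for j in range(i+1, len(res)):
--        #    if len(res[j][1]) == 1: continue
--            # checking for each clause c in res[i][1], whether it is occurs in the witness res[j][1]
--            for c1 in res[i][1]:
--                for c2 in res[j][1]:
--                   if c1 == c2: return False
--     return True
-- ===== SOURCE B (Python) =====
-- def is_compact(res):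
--     # One pass: occ maps each clause seen so far to whether its first containing
--     # witness has length != 1; a repeat occurrence with any non-singleton side fails.
--     occ = {}
--     for _, w in res:
--         multi = len(w) != 1
--         for c in dict.fromkeys(w):
--             if c in occ:
--                 if occ[c] or multi:
--                     return False
--             else:
--                 occ[c] = multi
--     return True
-- ===== Notes on version B (the rewrite author's own statement) =====
-- stated objective: alternative
-- what changed: Replaces A's scan over all ordered pairs of witnesses with nested clause-by-clause comparison by a single pass that indexes each clause in a dict mapping it to whether its first containing witness is non-singleton, failing on any repeated clause with a non-singleton side.
import Mathlib
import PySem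

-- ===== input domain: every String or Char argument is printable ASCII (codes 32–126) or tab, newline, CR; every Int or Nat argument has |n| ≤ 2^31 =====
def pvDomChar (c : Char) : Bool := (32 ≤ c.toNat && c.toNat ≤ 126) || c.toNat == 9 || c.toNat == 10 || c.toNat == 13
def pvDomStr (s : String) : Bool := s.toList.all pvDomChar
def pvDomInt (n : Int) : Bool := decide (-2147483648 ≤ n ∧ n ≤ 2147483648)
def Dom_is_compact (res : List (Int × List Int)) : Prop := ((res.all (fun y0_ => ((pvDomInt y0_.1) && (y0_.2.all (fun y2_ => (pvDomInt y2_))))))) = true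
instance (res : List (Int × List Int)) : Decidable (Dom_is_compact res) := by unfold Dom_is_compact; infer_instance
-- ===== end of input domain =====

-- B replaces A's quadruply-nested index scan by one pass over the witnesses that
-- indexes each clause in a dict (clause -> whether its first containing witness is
-- non-singleton); objective: alternative (different algorithm, same measured cost).


-- ===== PORT A =====
-- literal transliteration of A: for i in range(n): skip len==1; for j in range(n): skip j==i;
-- nested scan over res[i][1] x res[j][1]; the early 'return False' is the negated any-nest.
def is_compact (res : List (Int × List Int)) : Bool :=
  !((PySem.List.pyRange 0 (res.length : Int)).any (fun i =>
      let wi := (PySem.List.pyGetD res i (0, [])).2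
      if wi.length == 1 then false
      else (PySem.List.pyRange 0 (res.length : Int)).any (fun j =>
        if j == i then false
        else
          let wj := (PySem.List.pyGetD res j (0, [])).2
          wi.any (fun c1 => wj.any (fun c2 => c1 == c2)))))

-- ===== PORT B =====
-- inner loop of Source B: 'for c in dict.fromkeys(w): ...'; none = the early 'return False'
def bInner (occ : PySem.Dict Int Bool) (multi : Bool) : List Int → Option (PySem.Dict Int Bool)
  | [] => some occ
  | c :: cs =>
    match occ.get? c with
    | some m => if m || multi then none else bInner occ multi cs
    | none => bInner (occ.insert c multi) multi cs

-- outer loop of Source B over the witness pairs, threading the dict occ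
def bLoop (occ : PySem.Dict Int Bool) : List (Int × List Int) → Bool
  | [] => true
  | (_, w) :: rest =>
    match bInner occ (w.length != 1) (PySem.List.dedup w) with
    | none => false
    | some occ' => bLoop occ' rest

def is_compact_alt (res : List (Int × List Int)) : Bool :=
  bLoop PySem.Dict.empty res

-- ===== PRECONDITION & SPEC =====
def Spec_is_compact (res : List (Int × List Int)) (out : Bool) : Prop := out = is_compact_alt res
instance (res : List (Int × List Int)) (out : Bool) : Decidable (Spec_is_compact res out) := by unfold Spec_is_compact; infer_instance

-- ===== CLAIM (what is proved, stated in full; the proofs are below) =====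
def Claim_equal_is_compact : Prop := ∀ (res : List (Int × List Int)), Dom_is_compact res → Spec_is_compact res (is_compact res)

-- ===== LEMMAS AND PROOFS =====

-- two witnesses are compatible: disjoint clause lists, or both singletons
def Ok (w1 w2 : List Int) : Prop := (∀ c ∈ w1, c ∉ w2) ∨ (w1.length = 1 ∧ w2.length = 1)

-- A returns True iff the witness lists are pairwise compatible
theorem pair_char (res : List (Int × List Int)) :
    (∀ i (hi : i < res.length) j (hj : j < res.length), i ≠ j →
      (res[i]).2.length ≠ 1 → ∀ c ∈ (res[i]).2, c ∉ (res[j]).2)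
    ↔ List.Pairwise Ok (res.map Prod.snd) := by
  rw [List.pairwise_iff_getElem]
  simp only [List.length_map, List.getElem_map]
  constructor
  · intro h i j hi hj hij
    by_cases h1 : (res[i]).2.length = 1
    · by_cases h2 : (res[j]).2.length = 1
      · exact Or.inr ⟨h1, h2⟩
      · exact Or.inl (fun c hc hcj =>
          h j hj i hi (Nat.ne_of_gt hij) h2 c hcj hc)
    · exact Or.inl (h i hi j hj (Nat.ne_of_lt hij) h1)
  · intro h i hi j hj hij hlen c hc hcj
    rcases Nat.lt_or_lt_of_ne hij with hlt | hlt
    · rcases h i j hi hj hlt with hdisj | hlens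
      · exact hdisj c hc hcj
      · exact hlen hlens.1
    · rcases h j i hj hi hlt with hdisj | hlens
      · exact hdisj c hcj hc
      · exact hlen hlens.2

theorem A_iff (res : List (Int × List Int)) :
    is_compact res = true ↔ List.Pairwise Ok (res.map Prod.snd) := by
  rw [← pair_char res]
  unfold is_compact
  rw [Bool.not_eq_true', Bool.eq_false_iff]
  simp only [ne_eq, PySem.List.pyRange_zero_natCast, List.any_map, Function.comp_def,
    List.any_eq_true, List.mem_range, Bool.ite_then_false, PySem.List.pyGetD_natCast,
    beq_iff_eq, Nat.cast_inj]
  push Not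
  constructor
  · intro h i hi j hj hij hlen c hc hcj
    exact h i hi (by rwa [List.getD_eq_getElem _ _ hi]) j hj (fun e => hij e.symm)
      c (by rwa [List.getD_eq_getElem _ _ hi]) c (by rwa [List.getD_eq_getElem _ _ hj]) rfl
  · intro h i hi hlen j hj hji c1 hc1 c2 hc2 heq
    subst heq
    rw [List.getD_eq_getElem _ _ hi] at hlen hc1
    rw [List.getD_eq_getElem _ _ hj] at hc2
    exact h i hi j hj (fun e => hji e.symm) hlen c1 hc1 hc2

-- B's loop invariant: after a prefix P of witness lists, occ maps exactly the clauses of P,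
-- each to whether some witness of P containing it is non-singleton
def OccInv (P : List (List Int)) (occ : PySem.Dict Int Bool) : Prop :=
  ∀ c : Int, occ.get? c =
    if ∃ w ∈ P, c ∈ w then some (decide (∃ w ∈ P, c ∈ w ∧ w.length ≠ 1)) else none

theorem bInner_eq_none_iff (occ : PySem.Dict Int Bool) (multi : Bool)
    (cs : List Int) (hnd : cs.Nodup) :
    bInner occ multi cs = none ↔
      ∃ c ∈ cs, ∃ m, occ.get? c = some m ∧ (m || multi) = true := by
  induction cs generalizing occ with
  | nil => simp [bInner]
  | cons c0 cs ih =>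
    rw [List.nodup_cons] at hnd
    obtain ⟨hc0, hnd⟩ := hnd
    simp only [bInner]
    cases hg : occ.get? c0 with
    | some m =>
      by_cases hm : (m || multi) = true
      · simp only [hm]
        constructor
        · intro _; exact ⟨c0, by simp, m, hg, hm⟩
        · intro _; rfl
      · simp only [hm]
        rw [if_neg (by simp_all), ih occ hnd]
        constructor
        · rintro ⟨c, hc, m', h1, h2⟩; exact ⟨c, by simp [hc], m', h1, h2⟩
        · rintro ⟨c, hc, m', h1, h2⟩
          rcases List.mem_cons.mp hc with rfl | hc
          · rw [hg] at h1; cases h1; exact absurd h2 hm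
          · exact ⟨c, hc, m', h1, h2⟩
    | none =>
      rw [ih _ hnd]
      constructor
      · rintro ⟨c, hc, m', h1, h2⟩
        have hne : c ≠ c0 := fun h => hc0 (h ▸ hc)
        rw [PySem.Dict.get?_insert _ _ _ _, if_neg hne] at h1
        exact ⟨c, by simp [hc], m', h1, h2⟩
      · rintro ⟨c, hc, m', h1, h2⟩
        rcases List.mem_cons.mp hc with rfl | hc
        · rw [hg] at h1; cases h1
        · have hne : c ≠ c0 := fun h => hc0 (h ▸ hc)
          exact ⟨c, hc, m', by rw [PySem.Dict.get?_insert, if_neg hne]; exact h1, h2⟩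

theorem bInner_get? (occ : PySem.Dict Int Bool) (multi : Bool)
    (cs : List Int) (hnd : cs.Nodup) (occ' : PySem.Dict Int Bool)
    (h : bInner occ multi cs = some occ') (c : Int) :
    occ'.get? c = if c ∈ cs ∧ occ.get? c = none then some multi else occ.get? c := by
  induction cs generalizing occ with
  | nil => simp only [bInner] at h; cases h; simp
  | cons c0 cs ih =>
    rw [List.nodup_cons] at hnd
    obtain ⟨hc0, hnd⟩ := hnd
    simp only [bInner] at h
    cases hg : occ.get? c0 with
    | some m =>
      rw [hg] at h
      dsimp only at h
      by_cases hm : (m || multi) = true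
      · rw [if_pos hm] at h; cases h
      · rw [if_neg hm] at h
        rw [ih occ hnd h]
        by_cases hc : c = c0
        · subst hc; simp [hg, hc0]
        · simp only [List.mem_cons]
          by_cases hcs : c ∈ cs <;> simp [hc, hcs]
    | none =>
      rw [hg] at h
      dsimp only at h
      rw [ih _ hnd h]
      by_cases hc : c = c0
      · subst hc
        simp [hc0, hg, PySem.Dict.get?_insert_self]
      · rw [PySem.Dict.get?_insert, if_neg hc]
        simp only [List.mem_cons, hc, false_or]

theorem bLoop_iff (rest : List (Int × List Int)) (P : List (List Int))
    (occ : PySem.Dict Int Bool) (hocc : OccInv P occ)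
    (hP : List.Pairwise Ok P) :
    bLoop occ rest = true ↔ List.Pairwise Ok (P ++ rest.map Prod.snd) := by
  induction rest generalizing P occ with
  | nil => simp [bLoop, hP]
  | cons hd rest ih =>
    obtain ⟨a, w⟩ := hd
    have hmulti : (w.length != 1) = decide (w.length ≠ 1) := by
      cases h : decide (w.length ≠ 1) <;> simp_all [bne_iff_ne]
    simp only [bLoop]
    -- a fact used in both branches: if alive, every c shared with P is harmless
    cases hb : bInner occ (w.length != 1) (PySem.List.dedup w) with
    | none =>
      rw [bInner_eq_none_iff _ _ _ (PySem.List.nodup_dedup w)] at hb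
      obtain ⟨c, hcw, m, hg, hm⟩ := hb
      rw [PySem.List.mem_dedup] at hcw
      have hocc_c := hocc c
      rw [hg] at hocc_c
      have hex : ∃ w' ∈ P, c ∈ w' := by
        by_contra hne; rw [if_neg hne] at hocc_c; cases hocc_c
      rw [if_pos hex] at hocc_c
      have hmval : m = decide (∃ w' ∈ P, c ∈ w' ∧ w'.length ≠ 1) :=
        Option.some.inj hocc_c
      simp only [Bool.false_eq_true, false_iff]
      intro hpair
      rw [List.pairwise_append] at hpair
      obtain ⟨_, _, hcross⟩ := hpair
      rcases Bool.or_eq_true_iff.mp hm with hm1 | hm2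
      · rw [hmval] at hm1
        obtain ⟨w', hw'P, hcw', hlen⟩ := of_decide_eq_true hm1
        rcases hcross w' hw'P w (by simp) with hdisj | hlens
        · exact hdisj c hcw' hcw
        · exact hlen hlens.1
      · rw [hmulti] at hm2
        obtain ⟨w', hw'P, hcw'⟩ := hex
        rcases hcross w' hw'P w (by simp) with hdisj | hlens
        · exact hdisj c hcw' hcw
        · exact (of_decide_eq_true hm2) hlens.2
    | some occ' =>
      -- alive: every c shared between P and w has m = false and multi = false
      have halive : ∀ c ∈ w, ∀ m, occ.get? c = some m →
          m = false ∧ (w.length != 1) = false := by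
        intro c hc m hg
        by_contra hcon
        have : bInner occ (w.length != 1) (PySem.List.dedup w) = none := by
          rw [bInner_eq_none_iff _ _ _ (PySem.List.nodup_dedup w)]
          refine ⟨c, (PySem.List.mem_dedup w c).mpr hc, m, hg, ?_⟩
          cases m with
          | true => simp
          | false =>
            cases h2 : (w.length != 1) with
            | true => simp
            | false => exact absurd ⟨rfl, h2⟩ hcon
        rw [this] at hb; cases hb
      have hok : ∀ p ∈ P, Ok p w := by
        intro p hp
        by_cases hshare : ∃ c, c ∈ p ∧ c ∈ w
        · obtain ⟨c, hcp, hcw⟩ := hshare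
          have hex : ∃ w' ∈ P, c ∈ w' := ⟨p, hp, hcp⟩
          have hocc_c := hocc c
          rw [if_pos hex] at hocc_c
          obtain ⟨hm0, hmul0⟩ := halive c hcw _ hocc_c
          have hw1 : w.length = 1 := by
            rw [hmulti] at hmul0; simpa using hmul0
          have hp1 : p.length = 1 := by
            by_contra hne
            have : decide (∃ w' ∈ P, c ∈ w' ∧ w'.length ≠ 1) = true :=
              decide_eq_true ⟨p, hp, hcp, hne⟩
            rw [this] at hm0; cases hm0
          exact Or.inr ⟨hp1, hw1⟩
        · exact Or.inl (fun c hc hcw => hshare ⟨c, hc, hcw⟩)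
      have hocc' : OccInv (P ++ [w]) occ' := by
        intro c
        rw [bInner_get? _ _ _ (PySem.List.nodup_dedup w) _ hb c]
        simp only [PySem.List.mem_dedup]
        have hocc_c := hocc c
        by_cases hcw : c ∈ w
        · by_cases hex : ∃ w' ∈ P, c ∈ w'
          · rw [if_pos hex] at hocc_c
            rw [if_neg (by simp [hocc_c]), hocc_c,
              if_pos (by obtain ⟨w', h1, h2⟩ := hex; exact ⟨w', by simp [h1], h2⟩)]
            obtain ⟨hm0, hmul0⟩ := halive c hcw _ hocc_c
            have hw1 : w.length = 1 := by rw [hmulti] at hmul0; simpa using hmul0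
            congr 1
            have h1 : decide (∃ w' ∈ P, c ∈ w' ∧ w'.length ≠ 1) = false := hm0 ▸ rfl
            have h2 : decide (∃ w' ∈ P ++ [w], c ∈ w' ∧ w'.length ≠ 1) = false := by
              rw [decide_eq_false_iff_not]
              rintro ⟨w', hw', hcw', hlen⟩
              rcases List.mem_append.mp hw' with h | h
              · exact (of_decide_eq_false h1) ⟨w', h, hcw', hlen⟩
              · simp at h; subst h; exact hlen hw1
            rw [h1, h2]
          · rw [if_neg hex] at hocc_c
            rw [if_pos ⟨hcw, hocc_c⟩,
              if_pos ⟨w, by simp, hcw⟩]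
            congr 1
            rw [hmulti]
            congr 1
            simp only [eq_iff_iff]
            constructor
            · intro h; exact ⟨w, by simp, hcw, h⟩
            · rintro ⟨w', hw', hcw', hlen⟩
              rcases List.mem_append.mp hw' with h | h
              · exact absurd ⟨w', h, hcw'⟩ hex
              · simp at h; subst h; exact hlen
        · rw [if_neg (by rintro ⟨h, _⟩; exact hcw h), hocc_c]
          have hsame : (∃ w' ∈ P ++ [w], c ∈ w') ↔ (∃ w' ∈ P, c ∈ w') := by
            constructor
            · rintro ⟨w', hw', hcw'⟩
              rcases List.mem_append.mp hw' with h | h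
              · exact ⟨w', h, hcw'⟩
              · simp at h; subst h; exact absurd hcw' hcw
            · rintro ⟨w', h1, h2⟩; exact ⟨w', by simp [h1], h2⟩
          by_cases hex : ∃ w' ∈ P, c ∈ w'
          · rw [if_pos hex, if_pos (hsame.mpr hex)]
            rw [Option.some.injEq, decide_eq_decide]
            constructor
            · rintro ⟨w', h1, h2, h3⟩; exact ⟨w', by simp [h1], h2, h3⟩
            · rintro ⟨w', hw', h2, h3⟩
              rcases List.mem_append.mp hw' with h | h
              · exact ⟨w', h, h2, h3⟩
              · simp at h; subst h; exact absurd h2 hcw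
          · rw [if_neg hex, if_neg (fun h => hex (hsame.mp h))]
      have hP' : List.Pairwise Ok (P ++ [w]) := by
        rw [List.pairwise_append]
        exact ⟨hP, by simp, fun p hp w' hw' => by simp at hw'; subst hw'; exact hok p hp⟩
      rw [ih _ _ hocc' hP', List.append_assoc]
      simp

theorem B_iff (res : List (Int × List Int)) :
    is_compact_alt res = true ↔ List.Pairwise Ok (res.map Prod.snd) := by
  have h := bLoop_iff res [] PySem.Dict.empty
    (by intro c; simp [PySem.Dict.get?_empty]) (by simp)
  simpa [is_compact_alt] using h

-- ===== VERDICT (by name: the statement is the Claim_ definition above) =====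
theorem is_compact_spec : Claim_equal_is_compact := by
  intro res _
  unfold Spec_is_compact
  have hA := A_iff res
  have hB := B_iff res
  cases hA' : is_compact res <;> cases hB' : is_compact_alt res <;> simp_all
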